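-- pv_equiv track=rewrite | github.com/rastanton/cgMLST_Scripts | General_cgMLST_Parallel.py | List_Matrix
-- ===== SOURCE A (Python) =====
-- import math
--
-- def List_Matrix(length):
--     Out = []
--     Length = int(math.sqrt(length * 2))
--     New = []
--     for entry in range(Length):
--         New.append(entry)
--     Out.append(New)
--     for entry in range(1, Length):
--         New = []
--         for entry2 in range(Length):
-- ##            if (entry2) == 0:
-- ##                New.append(entry)
--             if entry2 < entry:
--                 New.append(Out[entry2][entry])
--             elif entry == entry2:
--                 New.append(Out[entry - 1][-1] + 1)
--             else:
--                 New.append(New[-1] + 1)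
--         Out.append(New)
--     return Out
-- ===== SOURCE B (Python) =====
-- import math
--
-- def List_Matrix(length):
--     n = int(math.sqrt(length * 2))
--
--     def val(i, j):
--         if i > j:
--             i, j = j, i
--         return i * n - i * (i - 1) // 2 + (j - i)
--
--     return [[val(i, j) for j in range(n)] for i in range(n)]
-- ===== Notes on version B (the rewrite author's own statement) =====
-- stated objective: simpler
-- what changed: Replaces A's row-by-row incremental construction (copying from earlier rows and extending the previous cell) with a direct closed-form formula val(i,j) = i*n - i*(i-1)//2 + (j-i) for i<=j (symmetric otherwise), built by a single nested comprehension over n rows.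
-- intended difference: On length = 0 (the only nonnegative input with matrix size 0), A returns [[]] -- one accidental empty row produced by its unconditional first append -- while B returns [], the natural empty matrix. — e.g. on List_Matrix(0): A returns [[]], B returns []
-- outside the precondition, e.g. on List_Matrix(-1): A raises ValueError, B raises ValueError
import Mathlib
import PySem

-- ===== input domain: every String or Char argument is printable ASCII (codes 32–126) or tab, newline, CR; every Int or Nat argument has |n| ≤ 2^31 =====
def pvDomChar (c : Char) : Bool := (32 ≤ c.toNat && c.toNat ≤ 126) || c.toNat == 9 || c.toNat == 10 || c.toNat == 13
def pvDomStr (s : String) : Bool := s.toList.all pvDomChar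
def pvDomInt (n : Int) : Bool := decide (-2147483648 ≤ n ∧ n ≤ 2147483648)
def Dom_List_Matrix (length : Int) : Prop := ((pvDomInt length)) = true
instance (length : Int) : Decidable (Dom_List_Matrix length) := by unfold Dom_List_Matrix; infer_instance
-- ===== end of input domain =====

-- B replaces A's incremental copy-from-earlier-rows construction with the closed-form
-- cell formula i*n - i*(i-1)//2 + (j-i) (symmetrised), for simplicity; at length = 0
-- B returns the empty matrix where A returns one accidental empty row.

-- ===== PORT A =====
-- int(math.sqrt(length * 2)): on Dom (length ≤ 2^31, so length*2 ≤ 2^32) the double sqrt is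
-- correctly rounded and int() of it equals the integer square root, ported as Nat.sqrt.
def List_Matrix (length : Int) : List (List Int) :=
  let Length : Nat := Nat.sqrt (length * 2).toNat
  -- first loop: New.append(entry) for entry in range(Length); Out.append(New)
  let New0 : List Int := (List.range Length).foldl (fun (New : List Int) (entry : Nat) => New ++ [(entry : Int)]) []
  let Out0 : List (List Int) := [New0]
  -- for entry in range(1, Length)
  (List.range' 1 (Length - 1)).foldl (fun (Out : List (List Int)) (entry : Nat) =>
    let New := (List.range Length).foldl (fun (New : List Int) (entry2 : Nat) =>
      if entry2 < entry then
        -- Out[entry2][entry]; both indexes are in range in Python here (default never used)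
        New ++ [PySem.List.pyGetD (Out.getD entry2 []) (entry : Int) 0]
      else if entry = entry2 then
        -- Out[entry - 1][-1] + 1; in range in Python here
        New ++ [PySem.List.pyGetD (Out.getD (entry - 1) []) (-1) 0 + 1]
      else
        -- New[-1] + 1; New is nonempty in Python here
        New ++ [PySem.List.pyGetD New (-1) 0 + 1]) []
    Out ++ [New]) Out0

-- ===== PORT B =====
def List_Matrix_alt (length : Int) : List (List Int) :=
  let n : Nat := Nat.sqrt (length * 2).toNat
  (List.range n).map (fun (i : Nat) =>
    (List.range n).map (fun (j : Nat) =>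
      let p : Nat × Nat := if i > j then (j, i) else (i, j)
      (p.1 : Int) * n - PySem.Int.floordiv ((p.1 : Int) * ((p.1 : Int) - 1)) 2
        + ((p.2 : Int) - (p.1 : Int))))

-- ===== PRECONDITION & SPEC =====
-- Pre_ excludes negative length, on which math.sqrt raises ValueError in A (and in B).
def Pre_List_Matrix (length : Int) : Prop := 0 ≤ length
instance (length : Int) : Decidable (Pre_List_Matrix length) := by unfold Pre_List_Matrix; infer_instance
def pvWitness_List_Matrix : Int := (10)
-- On length = 0 (the only nonnegative input with matrix size 0), A returns [[]] — one
-- accidental empty row from its unconditional first append — while B returns [], the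
-- natural empty matrix.
def D_List_Matrix (length : Int) : Prop := length = 0
instance (length : Int) : Decidable (D_List_Matrix length) := by unfold D_List_Matrix; infer_instance
def Spec_List_Matrix (length : Int) (out : List (List Int)) : Prop := ¬ D_List_Matrix length → out = List_Matrix_alt length
instance (length : Int) (out : List (List Int)) : Decidable (Spec_List_Matrix length out) := by unfold Spec_List_Matrix; infer_instance
def pvDiffWitness_List_Matrix : Int := (0)
def pvDiffWitnessOut_List_Matrix : (List (List Int)) × (List (List Int)) := ([[]], [])

-- ===== CLAIM (what is proved, stated in full; the proofs are below) =====
def Claim_unchanged_List_Matrix : Prop := ∀ (length : Int), Dom_List_Matrix length → Pre_List_Matrix length → Spec_List_Matrix length (List_Matrix length)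
def Claim_changed_List_Matrix : Prop := Dom_List_Matrix (pvDiffWitness_List_Matrix) ∧ Pre_List_Matrix (pvDiffWitness_List_Matrix) ∧ D_List_Matrix (pvDiffWitness_List_Matrix) ∧ List_Matrix (pvDiffWitness_List_Matrix) = pvDiffWitnessOut_List_Matrix.1 ∧ List_Matrix_alt (pvDiffWitness_List_Matrix) = pvDiffWitnessOut_List_Matrix.2 ∧ pvDiffWitnessOut_List_Matrix.1 ≠ pvDiffWitnessOut_List_Matrix.2
def Claim_exact_List_Matrix : Prop := ∀ (length : Int), Dom_List_Matrix length → Pre_List_Matrix length → D_List_Matrix length → List_Matrix length ≠ List_Matrix_alt length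

-- ===== LEMMAS AND PROOFS =====

-- the closed-form cell value, and the row it induces
def gVal (n i j : Nat) : Int :=
  ((min i j : Nat) : Int) * n
    - PySem.Int.floordiv (((min i j : Nat) : Int) * (((min i j : Nat) : Int) - 1)) 2
    + (((max i j : Nat) : Int) - ((min i j : Nat) : Int))
def rowB (n i : Nat) : List Int := (List.range n).map (gVal n i)

theorem two_dvd_pred_mul (a : Int) : (2 : Int) ∣ a * (a - 1) := by
  rcases Int.even_or_odd a with ⟨k, hk⟩ | ⟨k, hk⟩
  · exact ⟨k * (a - 1), by rw [hk]; ring⟩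
  · exact ⟨a * k, by rw [hk]; ring⟩

theorem floordiv_two_pred (a : Int) : PySem.Int.floordiv (a * (a - 1)) 2 * 2 = a * (a - 1) := by
  rw [PySem.Int.floordiv_eq_ediv_of_pos (by omega)]
  exact Int.ediv_mul_cancel (two_dvd_pred_mul a)

theorem gVal_symm (n i j : Nat) : gVal n i j = gVal n j i := by
  unfold gVal; rw [Nat.min_comm, Nat.max_comm]

theorem gVal_succ_right (n i j : Nat) (h : i ≤ j) : gVal n i (j + 1) = gVal n i j + 1 := by
  unfold gVal
  rw [Nat.min_eq_left h, Nat.min_eq_left (by omega), Nat.max_eq_right h, Nat.max_eq_right (by omega)]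
  push_cast; ring

-- the diagonal step: value at (k, k) is one more than value at (k-1, n-1)
theorem gVal_diag (n k : Nat) (h1 : 1 ≤ k) (h2 : k < n) :
    gVal n k k = gVal n (k - 1) (n - 1) + 1 := by
  unfold gVal
  rw [Nat.min_self, Nat.max_self, Nat.min_eq_left (by omega), Nat.max_eq_right (by omega)]
  have hk := floordiv_two_pred (k : Int)
  have hk1 := floordiv_two_pred (((k - 1 : Nat) : Int))
  have e1 : ((k - 1 : Nat) : Int) = (k : Int) - 1 := by
    have : 1 ≤ k := h1; push_cast [this]; ring
  rw [e1] at hk1 ⊢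
  have e2 : ((n - 1 : Nat) : Int) = (n : Int) - 1 := by
    have : 1 ≤ n := by omega
    push_cast [this]; ring
  rw [e2]
  nlinarith [hk, hk1]

theorem rowB_get (n i j : Nat) (h : j < n) : (rowB n i).getD j 0 = gVal n i j := by
  unfold rowB
  rw [List.getD_eq_getElem?_getD]
  simp [h]

theorem rowB_length (n i : Nat) : (rowB n i).length = n := by simp [rowB]

-- first row is rowB n 0
theorem first_row_eq (n : Nat) :
    (List.range n).foldl (fun (New : List Int) (entry : Nat) => New ++ [(entry : Int)]) [] = rowB n 0 := by
  have key : ∀ (l : List Nat) (acc : List Int),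
      l.foldl (fun (New : List Int) (entry : Nat) => New ++ [(entry : Int)]) acc
        = acc ++ l.map (fun (e : Nat) => (e : Int)) := by
    intro l
    induction l with
    | nil => simp
    | cons x xs ih => intro acc; simp [List.foldl_cons, ih]
  rw [key]
  unfold rowB
  simp only [List.nil_append]
  apply List.map_congr_left
  intro j hj
  simp [gVal, PySem.Int.floordiv]

-- the inner loop, given the first k rows, builds a prefix of rowB n k
theorem inner_prefix (n k : Nat) (h1 : 1 ≤ k) (h2 : k < n) (j : Nat) (hj : j ≤ n) :
    (List.range j).foldl (fun (New : List Int) (entry2 : Nat) =>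
      if entry2 < k then
        New ++ [PySem.List.pyGetD (((List.range k).map (rowB n)).getD entry2 []) (k : Int) 0]
      else if k = entry2 then
        New ++ [PySem.List.pyGetD (((List.range k).map (rowB n)).getD (k - 1) []) (-1) 0 + 1]
      else
        New ++ [PySem.List.pyGetD New (-1) 0 + 1]) []
    = (List.range j).map (gVal n k) := by
  induction j with
  | zero => simp
  | succ j ih =>
    have hj' : j ≤ n := by omega
    rw [List.range_succ, List.foldl_append, List.map_append, ih hj']
    simp only [List.foldl_cons, List.foldl_nil, List.map_cons, List.map_nil]
    by_cases hlt : j < k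
    · -- copy from row j at column k
      have hrow : ((List.range k).map (rowB n)).getD j [] = rowB n j := by
        rw [List.getD_eq_getElem?_getD]; simp [hlt]
      rw [if_pos hlt, hrow]
      have hg : PySem.List.pyGetD (rowB n j) (k : Int) 0 = (rowB n j).getD k 0 := by
        simp [PySem.List.pyGetD_natCast]
      rw [hg, rowB_get n j k h2, gVal_symm]
    · by_cases heq : k = j
      · -- diagonal: last element of row k-1, plus 1
        have hrow : ((List.range k).map (rowB n)).getD (k - 1) [] = rowB n (k - 1) := by
          rw [List.getD_eq_getElem?_getD]; simp [show k - 1 < k by omega]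
        rw [if_neg hlt, if_pos heq, hrow]
        have hne : rowB n (k - 1) ≠ [] := by
          intro hc; have hl := rowB_length n (k - 1); rw [hc] at hl; simp at hl; omega
        rw [PySem.List.pyGetD_neg_one _ _ hne]
        have hlast : (rowB n (k - 1)).getLast hne = gVal n (k - 1) (n - 1) := by
          rw [List.getLast_eq_getElem]
          unfold rowB
          simp
        rw [hlast, ← heq, ← gVal_diag n k h1 h2]
      · -- extend the previous cell by one
        have hkj' : k ≤ j - 1 := by omega
        rw [if_neg hlt, if_neg heq]
        have hne : (List.range j).map (gVal n k) ≠ [] := by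
          simp; omega
        rw [PySem.List.pyGetD_neg_one _ _ hne]
        have hlast : ((List.range j).map (gVal n k)).getLast hne = gVal n k (j - 1) := by
          rw [List.getLast_eq_getElem]
          simp
        rw [hlast]
        have hj1 : j = (j - 1) + 1 := by omega
        rw [hj1, gVal_succ_right n k (j - 1) hkj']
        simp

-- the outer loop extends the map-prefix row by row
theorem outer_fold (n : Nat) (m k : Nat) (h1 : 1 ≤ k) (hkm : k + m ≤ n) :
    (List.range' k m).foldl (fun (Out : List (List Int)) (entry : Nat) =>
      let New := (List.range n).foldl (fun (New : List Int) (entry2 : Nat) =>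
        if entry2 < entry then
          New ++ [PySem.List.pyGetD (Out.getD entry2 []) (entry : Int) 0]
        else if entry = entry2 then
          New ++ [PySem.List.pyGetD (Out.getD (entry - 1) []) (-1) 0 + 1]
        else
          New ++ [PySem.List.pyGetD New (-1) 0 + 1]) []
      Out ++ [New]) ((List.range k).map (rowB n))
    = (List.range (k + m)).map (rowB n) := by
  induction m generalizing k with
  | zero => simp
  | succ m ih =>
    rw [List.range'_succ, List.foldl_cons]
    have hstep : ((List.range k).map (rowB n)) ++
        [(List.range n).foldl (fun (New : List Int) (entry2 : Nat) =>
          if entry2 < k then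
            New ++ [PySem.List.pyGetD (((List.range k).map (rowB n)).getD entry2 []) (k : Int) 0]
          else if k = entry2 then
            New ++ [PySem.List.pyGetD (((List.range k).map (rowB n)).getD (k - 1) []) (-1) 0 + 1]
          else
            New ++ [PySem.List.pyGetD New (-1) 0 + 1]) []]
        = (List.range (k + 1)).map (rowB n) := by
      rw [inner_prefix n k h1 (by omega) n (le_refl n), List.range_succ, List.map_append]
      rfl
    simp only at hstep ⊢
    rw [hstep, ih (k + 1) (by omega) (by omega),
      show k + 1 + m = k + (m + 1) from by omega]

-- B's port produces exactly the rows rowB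
theorem alt_eq_rows (length : Int) :
    List_Matrix_alt length =
      (List.range (Nat.sqrt (length * 2).toNat)).map (rowB (Nat.sqrt (length * 2).toNat)) := by
  unfold List_Matrix_alt rowB
  apply List.map_congr_left
  intro i _
  apply List.map_congr_left
  intro j _
  unfold gVal
  by_cases h : i > j
  · rw [if_pos h, Nat.min_eq_right (by omega), Nat.max_eq_left (by omega)]
  · rw [if_neg h, Nat.min_eq_left (by omega), Nat.max_eq_right (by omega)]

-- ===== VERDICT (by name: the statements are the Claim_ definitions above) =====
theorem List_Matrix_spec : Claim_unchanged_List_Matrix := by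
  intro length _ hpre hD
  unfold D_List_Matrix at hD
  unfold List_Matrix
  rw [alt_eq_rows]
  simp only
  rw [first_row_eq]
  have h1 : 1 ≤ Nat.sqrt (length * 2).toNat := by
    have hl : 1 ≤ length := by
      rcases lt_or_eq_of_le hpre with h | h
      · omega
      · exact absurd h.symm hD
    exact Nat.sqrt_pos.mpr (by omega)
  have hone : ([rowB (Nat.sqrt (length * 2).toNat) 0] : List (List Int))
      = (List.range 1).map (rowB (Nat.sqrt (length * 2).toNat)) := by simp
  rw [hone, outer_fold (Nat.sqrt (length * 2).toNat) (Nat.sqrt (length * 2).toNat - 1) 1 (le_refl 1) (by omega),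
    show 1 + (Nat.sqrt (length * 2).toNat - 1) = Nat.sqrt (length * 2).toNat from by omega]

theorem List_Matrix_changed : Claim_changed_List_Matrix := by
  unfold Claim_changed_List_Matrix; decide

theorem List_Matrix_tight : Claim_exact_List_Matrix := by
  intro length _ _ hD
  subst hD
  decide
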